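-- pv_equiv track=rewrite | github.com/Maxwells-Dragon/tile-splitter | src/utils/name_collision.py | resolve_collision
-- ===== SOURCE A (Python) =====
-- from typing import Set
--
-- def resolve_collision(
--     base_name: str,
--     used_names: Set[str],
--     extension: str,
-- ) -> str:
--     """Resolve a name collision by appending a numeric suffix.
--
--     Args:
--         base_name: The desired name (without extension).
--         used_names: Set of already used filenames (with extension).
--         extension: File extension (without dot).
--
--     Returns:
--         A unique filename (with extension).
--     """
--     filename = f"{base_name}.{extension}"
--
--     if filename not in used_names:
--         return filename
--
--     # Try appending _1, _2, etc.
--     counter = 1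
--     while True:
--         new_filename = f"{base_name}_{counter}.{extension}"
--         if new_filename not in used_names:
--             return new_filename
--         counter += 1
--
--         # Safety limit
--         if counter > 10000:
--             raise ValueError(f"Could not resolve collision for {base_name}")
-- ===== SOURCE B (Python) =====
-- def resolve_collision(base_name, used_names, extension):
--     filename = f"{base_name}.{extension}"
--     if filename not in used_names:
--         return filename
--     prefix = f"{base_name}_"
--     suffix = f".{extension}"
--     taken = set()
--     for name in used_names:
--         if name.startswith(prefix) and name.endswith(suffix):
--             taken.add(name[len(prefix):len(name) - len(suffix)])
--     for counter in range(1, 10001):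
--         if str(counter) not in taken:
--             return f"{base_name}_{counter}.{extension}"
--     raise ValueError(f"Could not resolve collision for {base_name}")
-- ===== Notes on version B (the rewrite author's own statement) =====
-- stated objective: alternative
-- what changed: A repeatedly generates candidate filenames and tests each against used_names; B makes one pass over used_names extracting the suffix substring of every name shaped base_name_<mid>.extension into a set, then returns the first counter whose str is not in that set.
import Mathlib
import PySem

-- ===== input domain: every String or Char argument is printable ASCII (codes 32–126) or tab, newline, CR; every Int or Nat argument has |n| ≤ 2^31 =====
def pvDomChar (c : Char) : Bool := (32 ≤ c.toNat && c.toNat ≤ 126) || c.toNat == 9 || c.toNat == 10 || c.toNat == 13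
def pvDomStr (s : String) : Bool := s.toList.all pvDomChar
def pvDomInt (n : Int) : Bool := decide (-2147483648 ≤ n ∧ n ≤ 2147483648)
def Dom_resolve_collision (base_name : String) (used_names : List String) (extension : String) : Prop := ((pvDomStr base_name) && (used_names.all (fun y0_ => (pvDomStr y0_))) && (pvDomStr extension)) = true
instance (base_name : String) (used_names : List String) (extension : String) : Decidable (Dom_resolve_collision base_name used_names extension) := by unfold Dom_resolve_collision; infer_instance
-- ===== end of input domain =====

-- B replaces A's candidate-generate-and-test loop by one pass over used_names that indexes the
-- numeric-suffix substrings into a set, then scans counters against that set (objective: alternative).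

-- ===== PORT A =====
-- f"{base_name}.{extension}"
def pvName0 (base_name extension : String) : String :=
  String.ofList (base_name.toList ++ '.' :: extension.toList)
-- f"{base_name}_{counter}.{extension}"
def pvNameN (base_name : String) (counter : Int) (extension : String) : String :=
  String.ofList (base_name.toList ++ '_' :: (PySem.Int.toChars counter ++ '.' :: extension.toList))

-- A's 'while True' loop; fuel counts the iterations left before 'counter > 10000' makes A
-- raise ValueError (that path, excluded by Pre_, returns "").
def pvALoop (base_name : String) (used_names : List String) (extension : String) : Nat → Int → String
  | 0, _ => ""
  | fuel + 1, counter =>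
    let new_filename := pvNameN base_name counter extension
    if new_filename ∈ used_names then pvALoop base_name used_names extension fuel (counter + 1)
    else new_filename

def resolve_collision (base_name : String) (used_names : List String) (extension : String) : String :=
  let filename := pvName0 base_name extension
  if filename ∈ used_names then pvALoop base_name used_names extension 10000 1
  else filename

-- ===== PORT B =====
-- B's first pass: taken = set of name[len(prefix) : len(name)-len(suffix)] for matching names
-- (slice is exact via PySem.List.slice on the char list).
def pvTaken (pre suf : List Char) (used_names : List String) : PySem.Set (List Char) :=
  used_names.foldl (fun taken name =>
    if PySem.Chars.startswith name.toList pre && PySem.Chars.endswith name.toList suf then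
      taken.add (PySem.List.slice name.toList (some (pre.length : Int))
        (some ((name.toList.length : Int) - (suf.length : Int))))
    else taken) PySem.Set.empty

-- B's 'for counter in range(1, 10001)' with early return; [] is the ValueError path (returns "").
def pvBLoop (base_name extension : String) (taken : PySem.Set (List Char)) : List Int → String
  | [] => ""
  | counter :: rest =>
    if PySem.Int.toChars counter ∈ taken then pvBLoop base_name extension taken rest
    else pvNameN base_name counter extension

def resolve_collision_alt (base_name : String) (used_names : List String) (extension : String) : String :=
  let filename := pvName0 base_name extension
  if filename ∈ used_names then
    pvBLoop base_name extension
      (pvTaken (base_name.toList ++ ['_']) ('.' :: extension.toList) used_names)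
      (PySem.List.pyRange 1 10001)
  else filename

-- ===== PRECONDITION & SPEC =====
-- Pre_ excludes exactly the inputs on which the Python A raises ValueError: those where the
-- plain filename and all 10000 numbered candidates are already in used_names.
def Pre_resolve_collision (base_name : String) (used_names : List String) (extension : String) : Prop :=
  pvName0 base_name extension ∉ used_names ∨
    ∃ c ∈ PySem.List.pyRange 1 10001, pvNameN base_name c extension ∉ used_names
instance (base_name : String) (used_names : List String) (extension : String) : Decidable (Pre_resolve_collision base_name used_names extension) := by unfold Pre_resolve_collision; infer_instance
def pvWitness_resolve_collision : String × List String × String := ("report", [], "txt")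

def Spec_resolve_collision (base_name : String) (used_names : List String) (extension : String) (out : String) : Prop := out = resolve_collision_alt base_name used_names extension
instance (base_name : String) (used_names : List String) (extension : String) (out : String) : Decidable (Spec_resolve_collision base_name used_names extension out) := by unfold Spec_resolve_collision; infer_instance

-- ===== CLAIM (what is proved, stated in full; the proofs are below) =====
def Claim_equal_resolve_collision : Prop := ∀ (base_name : String) (used_names : List String) (extension : String), Dom_resolve_collision base_name used_names extension → Pre_resolve_collision base_name used_names extension → Spec_resolve_collision base_name used_names extension (resolve_collision base_name used_names extension)

-- ===== LEMMAS AND PROOFS =====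

-- str(c) for c ≥ 1 is never the empty string
lemma pv_toDigitsCore_ne_nil (b : Nat) : ∀ (f n : Nat) (acc : List Char), acc ≠ [] → Nat.toDigitsCore b f n acc ≠ [] := by
  intro f
  induction f with
  | zero => intro n acc h; simpa [Nat.toDigitsCore] using h
  | succ f ih =>
    intro n acc h
    simp only [Nat.toDigitsCore]
    split
    · exact List.cons_ne_nil _ _
    · exact ih _ _ (List.cons_ne_nil _ _)

lemma pv_toChars_ne_nil (c : Int) (h : 1 ≤ c) : PySem.Int.toChars c ≠ [] := by
  simp only [PySem.Int.toChars, if_neg (show ¬ c < 0 by omega)]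
  unfold Nat.toDigits
  simp only [Nat.toDigitsCore]
  split
  · exact List.cons_ne_nil _ _
  · exact pv_toDigitsCore_ne_nil _ _ _ _ (List.cons_ne_nil _ _)

-- the middle slice of pre ++ m ++ suf is m
lemma pv_slice_concat (pre m suf : List Char) :
    PySem.List.slice (pre ++ m ++ suf) (some (pre.length : Int))
      (some (((pre ++ m ++ suf).length : Int) - (suf.length : Int))) = m := by
  have hlen : (pre ++ m ++ suf).length = pre.length + m.length + suf.length := by simp; omega
  simp only [PySem.List.slice]
  rw [PySem.List.clampIdx_of_nonneg_of_le (by omega) (by omega),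
      PySem.List.clampIdx_of_nonneg_of_le (by omega) (by omega)]
  rw [show (((pre ++ m ++ suf).length : Int) - (suf.length : Int)).toNat = pre.length + m.length from by omega,
      show ((pre.length : Int)).toNat = pre.length from by omega,
      show pre.length + m.length - pre.length = m.length from by omega]
  rw [List.append_assoc, List.drop_left, List.take_left]

-- a name that starts with pre, ends with suf and has nonempty middle slice m is pre ++ m ++ suf
lemma pv_match_decomp (pre suf n m : List Char) (hm : m ≠ [])
    (hpre : PySem.Chars.startswith n pre = true) (hsuf : PySem.Chars.endswith n suf = true)
    (hmid : PySem.List.slice n (some (pre.length : Int))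
      (some ((n.length : Int) - (suf.length : Int))) = m) :
    n = pre ++ m ++ suf := by
  rw [PySem.Chars.startswith_iff] at hpre
  rw [PySem.Chars.endswith_iff] at hsuf
  obtain ⟨t, ht⟩ := hpre
  obtain ⟨u, hu⟩ := hsuf
  have hplen : pre.length ≤ n.length := by
    have := congrArg List.length ht; simp at this; omega
  have hslen : suf.length ≤ n.length := by
    have := congrArg List.length hu; simp at this; omega
  by_cases hlen : pre.length + suf.length ≤ n.length
  · have hup : pre.length ≤ u.length := by
      have := congrArg List.length hu; simp at this; omega
    have heq : pre ++ t = u ++ suf := by rw [ht, hu]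
    have hteq : t = List.drop pre.length u ++ suf := by
      have h1 : t = List.drop pre.length (pre ++ t) := List.drop_left.symm
      rw [heq, List.drop_append_of_le_length hup] at h1
      exact h1
    have hw : n = pre ++ List.drop pre.length u ++ suf := by
      rw [← ht, hteq, List.append_assoc]
    have hsl := pv_slice_concat pre (List.drop pre.length u) suf
    rw [← hw] at hsl
    rw [hmid] at hsl
    rw [hw, ← hsl]
  · exfalso
    apply hm
    rw [← hmid]
    simp only [PySem.List.slice]
    rw [PySem.List.clampIdx_of_nonneg_of_le (by omega) (by omega),
        PySem.List.clampIdx_of_nonneg_of_le (by omega) (by omega)]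
    rw [show (((n.length : Int)) - (suf.length : Int)).toNat - ((pre.length : Int)).toNat = 0 from by omega]
    simp

-- what pvTaken collects, with a generalized accumulator
lemma pv_taken_go (pre suf m : List Char) :
    ∀ (used : List String) (s : PySem.Set (List Char)),
      (m ∈ List.foldl (fun taken name =>
        if PySem.Chars.startswith name.toList pre && PySem.Chars.endswith name.toList suf then
          taken.add (PySem.List.slice name.toList (some (pre.length : Int))
            (some ((name.toList.length : Int) - (suf.length : Int))))
        else taken) s used) ↔
      (m ∈ s ∨ ∃ name ∈ used,
        (PySem.Chars.startswith name.toList pre && PySem.Chars.endswith name.toList suf) = true ∧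
        PySem.List.slice name.toList (some (pre.length : Int))
          (some ((name.toList.length : Int) - (suf.length : Int))) = m) := by
  intro used
  induction used with
  | nil => intro s; simp
  | cons name rest ih =>
    intro s
    simp only [List.foldl_cons]
    rw [ih]
    by_cases h : (PySem.Chars.startswith name.toList pre && PySem.Chars.endswith name.toList suf) = true
    · rw [if_pos h, PySem.Set.mem_add]
      constructor
      · rintro ((hs | he) | ⟨nm, hnm, hc, hsl⟩)
        · exact Or.inl hs
        · exact Or.inr ⟨name, List.mem_cons_self .., h, he.symm⟩
        · exact Or.inr ⟨nm, List.mem_cons_of_mem _ hnm, hc, hsl⟩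
      · rintro (hs | ⟨nm, hnm, hc, hsl⟩)
        · exact Or.inl (Or.inl hs)
        · rcases List.mem_cons.mp hnm with rfl | hnm'
          · exact Or.inl (Or.inr hsl.symm)
          · exact Or.inr ⟨nm, hnm', hc, hsl⟩
    · rw [if_neg h]
      constructor
      · rintro (hs | ⟨nm, hnm, hc, hsl⟩)
        · exact Or.inl hs
        · exact Or.inr ⟨nm, List.mem_cons_of_mem _ hnm, hc, hsl⟩
      · rintro (hs | ⟨nm, hnm, hc, hsl⟩)
        · exact Or.inl hs
        · rcases List.mem_cons.mp hnm with rfl | hnm'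
          · exact absurd hc h
          · exact Or.inr ⟨nm, hnm', hc, hsl⟩

lemma pv_mem_taken (pre suf : List Char) (used : List String) (m : List Char) :
    m ∈ pvTaken pre suf used ↔ ∃ name ∈ used,
      (PySem.Chars.startswith name.toList pre && PySem.Chars.endswith name.toList suf) = true ∧
      PySem.List.slice name.toList (some (pre.length : Int))
        (some ((name.toList.length : Int) - (suf.length : Int))) = m := by
  unfold pvTaken
  rw [pv_taken_go]
  simp [PySem.Set.empty]

lemma pv_nameN_toList (base_name : String) (c : Int) (extension : String) :
    (pvNameN base_name c extension).toList =
      (base_name.toList ++ ['_']) ++ PySem.Int.toChars c ++ ('.' :: extension.toList) := by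
  simp [pvNameN, String.toList_ofList]

-- the bridge between the two loops' tests
lemma pv_key (base_name extension : String) (used : List String) (c : Int) (h1 : 1 ≤ c) :
    (PySem.Int.toChars c ∈ pvTaken (base_name.toList ++ ['_']) ('.' :: extension.toList) used) ↔
      pvNameN base_name c extension ∈ used := by
  constructor
  · intro h
    rw [pv_mem_taken] at h
    obtain ⟨name, hmem, hcond, hmid⟩ := h
    obtain ⟨hps, hes⟩ := Bool.and_eq_true_iff.mp hcond
    have hd := pv_match_decomp _ _ _ _ (pv_toChars_ne_nil c h1) hps hes hmid
    have hname : name = pvNameN base_name c extension := by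
      rw [← String.toList_inj, hd, pv_nameN_toList]
    rwa [hname] at hmem
  · intro h
    rw [pv_mem_taken]
    refine ⟨pvNameN base_name c extension, h, ?_, ?_⟩
    · rw [Bool.and_eq_true_iff]
      constructor
      · rw [PySem.Chars.startswith_iff, pv_nameN_toList, List.append_assoc]
        exact List.prefix_append _ _
      · rw [PySem.Chars.endswith_iff, pv_nameN_toList]
        exact List.suffix_append _ _
    · rw [pv_nameN_toList]
      exact pv_slice_concat _ _ _

lemma pv_loops (base_name extension : String) (used : List String) :
    ∀ (fuel : Nat) (c : Int), 1 ≤ c → c + fuel = 10001 →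
      pvALoop base_name used extension fuel c =
        pvBLoop base_name extension
          (pvTaken (base_name.toList ++ ['_']) ('.' :: extension.toList) used)
          (PySem.List.pyRange c 10001) := by
  intro fuel
  induction fuel with
  | zero =>
    intro c h1 h2
    rw [PySem.List.pyRange_one_eq_nil (by omega)]
    rfl
  | succ fuel ih =>
    intro c h1 h2
    rw [PySem.List.pyRange_one_cons (by omega)]
    rw [show pvALoop base_name used extension (fuel + 1) c =
      (if pvNameN base_name c extension ∈ used then pvALoop base_name used extension fuel (c + 1)
       else pvNameN base_name c extension) from rfl]
    rw [show pvBLoop base_name extension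
          (pvTaken (base_name.toList ++ ['_']) ('.' :: extension.toList) used)
          (c :: PySem.List.pyRange (c + 1) 10001) =
      (if PySem.Int.toChars c ∈ pvTaken (base_name.toList ++ ['_']) ('.' :: extension.toList) used
       then pvBLoop base_name extension
          (pvTaken (base_name.toList ++ ['_']) ('.' :: extension.toList) used)
          (PySem.List.pyRange (c + 1) 10001)
       else pvNameN base_name c extension) from rfl]
    by_cases hc : pvNameN base_name c extension ∈ used
    · rw [if_pos hc, if_pos ((pv_key base_name extension used c h1).mpr hc)]
      exact ih (c + 1) (by omega) (by omega)
    · rw [if_neg hc, if_neg (fun hh => hc ((pv_key base_name extension used c h1).mp hh))]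

-- ===== VERDICT (by name: the statement is the Claim_ definition above) =====
theorem resolve_collision_spec : Claim_equal_resolve_collision := by
  intro base_name used_names extension _hdom _hpre
  unfold Spec_resolve_collision resolve_collision resolve_collision_alt
  by_cases hmem : pvName0 base_name extension ∈ used_names
  · simp only [hmem, if_pos]
    exact pv_loops base_name extension used_names 10000 1 (by omega) (by omega)
  · simp only [hmem, if_neg, not_false_eq_true]
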